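-- pv_equiv track=rewrite | github.com/MrBrantCode/unitest_baseline | mut_generate/mist_train_cf/cf_84115/solution.py | quantum_entanglement
-- ===== SOURCE A (Python) =====
-- def quantum_entanglement(n, particles):
--     entangled_state = []
--     for i in range(2**n):
--         state = []
--         for j in range(n):
--             state.append(particles[j] if (i & (1 << j)) else 0)
--         entangled_state.append(state)
--     return entangled_state
-- ===== SOURCE B (Python) =====
-- def quantum_entanglement(n, particles):
--     result = [[]]
--     for j in range(n):
--         result = [s + [0] for s in result] + [s + [particles[j]] for s in result]
--     return result
-- ===== Notes on version B (the rewrite author's own statement) =====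
-- stated objective: simpler
-- what changed: Replaces the 2^n bitmask enumeration with an inner bit-test loop by iterative doubling: starting from [[]], each particle doubles the list by appending 0 to one copy and particles[j] to the other, preserving A's index order.
import Mathlib
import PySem

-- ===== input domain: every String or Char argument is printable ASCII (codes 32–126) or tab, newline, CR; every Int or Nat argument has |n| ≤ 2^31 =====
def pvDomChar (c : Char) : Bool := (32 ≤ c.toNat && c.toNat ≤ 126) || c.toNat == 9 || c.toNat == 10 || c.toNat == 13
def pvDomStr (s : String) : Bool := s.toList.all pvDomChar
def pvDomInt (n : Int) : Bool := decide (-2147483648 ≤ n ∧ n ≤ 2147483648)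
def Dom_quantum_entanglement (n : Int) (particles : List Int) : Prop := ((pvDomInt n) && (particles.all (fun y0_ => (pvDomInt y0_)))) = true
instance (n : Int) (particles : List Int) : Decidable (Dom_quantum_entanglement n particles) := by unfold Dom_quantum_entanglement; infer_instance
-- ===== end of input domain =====

-- B builds the 2^n states by iterative doubling over the particles instead of A's bitmask enumeration; objective: simpler.


-- ===== PORT A =====
-- i & (1 << j) ≠ 0 is Nat.testBit i j; particles[j] is in range on every admitted input
-- (Pre_ below), so getD 0 is exact there.
def quantum_entanglement (n : Int) (particles : List Int) : List (List Int) :=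
  (List.range (2 ^ n.toNat)).foldl
    (fun entangled_state i =>
      entangled_state ++
        [(List.range n.toNat).foldl
          (fun state j => state ++ [if i.testBit j then particles.getD j 0 else 0]) []])
    []

-- ===== PORT B =====
def quantum_entanglement_alt (n : Int) (particles : List Int) : List (List Int) :=
  (List.range n.toNat).foldl
    (fun result j =>
      result.map (fun s => s ++ [0]) ++ result.map (fun s => s ++ [particles.getD j 0]))
    [[]]

-- ===== PRECONDITION & SPEC =====
-- Pre_ excludes exactly the inputs on which A raises: n < 0 (TypeError on range(2**n))
-- and n > len(particles) (IndexError on particles[j]).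
def Pre_quantum_entanglement (n : Int) (particles : List Int) : Prop :=
  0 ≤ n ∧ n ≤ particles.length

instance (n : Int) (particles : List Int) : Decidable (Pre_quantum_entanglement n particles) := by
  unfold Pre_quantum_entanglement; infer_instance

def pvWitness_quantum_entanglement : Int × List Int := (2, [3, 7])

def Spec_quantum_entanglement (n : Int) (particles : List Int) (out : List (List Int)) : Prop :=
  out = quantum_entanglement_alt n particles
instance (n : Int) (particles : List Int) (out : List (List Int)) : Decidable (Spec_quantum_entanglement n particles out) := by
  unfold Spec_quantum_entanglement; infer_instance

-- ===== CLAIM (what is proved, stated in full; the proofs are below) =====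
def Claim_equal_quantum_entanglement : Prop := ∀ (n : Int) (particles : List Int), Dom_quantum_entanglement n particles → Pre_quantum_entanglement n particles → Spec_quantum_entanglement n particles (quantum_entanglement n particles)

-- ===== LEMMAS AND PROOFS =====

-- append-accumulator foldl over a range is a map
theorem foldl_append_range_map {α : Type} (f : Nat → α) (k : Nat) (acc : List α) :
    (List.range k).foldl (fun a i => a ++ [f i]) acc = acc ++ (List.range k).map f := by
  induction k generalizing acc with
  | zero => simp
  | succ k ih => simp [List.range_succ, ih]

-- A's inner state for mask i with m bits
def qeState (particles : List Int) (m i : Nat) : List Int :=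
  (List.range m).map (fun j => if i.testBit j then particles.getD j 0 else 0)

theorem qeState_succ_lo (particles : List Int) (m i : Nat) (hi : i < 2 ^ m) :
    qeState particles (m + 1) i = qeState particles m i ++ [0] := by
  simp [qeState, List.range_succ, Nat.testBit_lt_two_pow hi]

theorem qeState_succ_hi (particles : List Int) (m i : Nat) (hi : i < 2 ^ m) :
    qeState particles (m + 1) (2 ^ m + i)
      = qeState particles m i ++ [particles.getD m 0] := by
  unfold qeState
  rw [List.range_succ, List.map_append]
  congr 1
  · apply List.map_congr_left
    intro j hj
    rw [List.mem_range] at hj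
    rw [Nat.testBit_two_pow_add_gt hj i]
  · have hb : (2 ^ m + i).testBit m = true := by
      rw [Nat.testBit_two_pow_add_eq i m, Nat.testBit_lt_two_pow hi]
      rfl
    simp [hb]

-- the core equivalence on the Nat bit-count
theorem qe_core (particles : List Int) (m : Nat) :
    (List.range (2 ^ m)).map (qeState particles m)
      = (List.range m).foldl
          (fun result j =>
            result.map (fun s => s ++ [0]) ++ result.map (fun s => s ++ [particles.getD j 0]))
          [[]] := by
  induction m with
  | zero => simp [qeState]
  | succ m ih =>
    rw [List.range_succ, List.foldl_append, ← ih]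
    have hsplit : List.range (2 ^ (m + 1))
        = List.range (2 ^ m) ++ (List.range (2 ^ m)).map (fun i => 2 ^ m + i) := by
      rw [pow_succ, mul_two, List.range_add]
    rw [hsplit, List.map_append]
    simp only [List.foldl_cons, List.foldl_nil, List.map_map]
    congr 1
    · apply List.map_congr_left
      intro i hi
      exact qeState_succ_lo particles m i (List.mem_range.mp hi)
    · apply List.map_congr_left
      intro i hi
      exact qeState_succ_hi particles m i (List.mem_range.mp hi)

-- ===== VERDICT (by name: the statement is the Claim_ definition above) =====
theorem quantum_entanglement_spec : Claim_equal_quantum_entanglement := by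
  intro n particles _ _
  show quantum_entanglement n particles = quantum_entanglement_alt n particles
  have h := qe_core particles n.toNat
  simp only [quantum_entanglement, quantum_entanglement_alt, foldl_append_range_map,
    List.nil_append]
  exact h
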